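-- pv_equiv track=rewrite | github.com/colinbrownec/AdventOfCode | 2024/day9/day9.py | diskmap_files
-- ===== SOURCE A (Python) =====
-- def diskmap_files(diskmap):
--     index = 0
--     num = 0
--     file = True
--     files = []
--     for val in diskmap:
--         if file:
--             files.append({ 'value': num, 'index': index, 'size': val})
--             num += 1
--         file = not file
--         index += val
--     return files
-- ===== SOURCE B (Python) =====
-- def diskmap_files(diskmap):
--     vals = list(diskmap)
--     prefix = [0]
--     for v in vals:
--         prefix.append(prefix[-1] + v)
--     return [{'value': i // 2, 'index': prefix[i], 'size': v}
--             for i, v in enumerate(vals) if i % 2 == 0]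
-- ===== Notes on version B (the rewrite author's own statement) =====
-- stated objective: alternative
-- what changed: Replaces the single interleaved loop threading index/num/file state with a two-phase decomposition: build a prefix-sum index table once, then emit files in one filtering comprehension over enumerate keeping even positions.
import Mathlib
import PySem

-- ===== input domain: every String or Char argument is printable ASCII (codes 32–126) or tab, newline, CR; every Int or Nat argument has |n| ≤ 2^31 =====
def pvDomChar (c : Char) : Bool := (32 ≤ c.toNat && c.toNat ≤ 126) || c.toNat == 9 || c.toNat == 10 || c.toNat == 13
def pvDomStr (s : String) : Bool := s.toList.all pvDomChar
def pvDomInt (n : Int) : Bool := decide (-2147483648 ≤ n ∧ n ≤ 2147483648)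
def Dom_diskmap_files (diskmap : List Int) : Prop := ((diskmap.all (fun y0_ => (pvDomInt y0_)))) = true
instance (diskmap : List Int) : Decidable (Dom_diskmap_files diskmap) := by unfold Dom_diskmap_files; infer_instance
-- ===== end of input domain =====

-- B builds a prefix-sum index table first and then emits files in one filtering
-- pass over enumerate, instead of threading index/num/file state through one
-- interleaved loop (objective: alternative decomposition, same cost).

-- ===== PORT A =====
-- state = (index, num, file, files), exactly A's loop variables
def pvStepA (st : Int × Int × Bool × List (List (String × Int))) (val : Int) :
    Int × Int × Bool × List (List (String × Int)) :=
  let index := st.1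
  let num := st.2.1
  let file := st.2.2.1
  let files := st.2.2.2
  let files' := if file then files ++ [[("value", num), ("index", index), ("size", val)]] else files
  let num' := if file then num + 1 else num
  (index + val, num', !file, files')

def diskmap_files (diskmap : List Int) : List (List (String × Int)) :=
  (diskmap.foldl pvStepA (0, 0, true, [])).2.2.2

-- ===== PORT B =====
def diskmap_files_alt (diskmap : List Int) : List (List (String × Int)) :=
  -- prefix = [0]; for v in vals: prefix.append(prefix[-1] + v)
  let pre := diskmap.foldl (fun p v => p ++ [PySem.List.pyGetD p (-1) 0 + v]) [(0 : Int)]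
  -- [{…} for i, v in enumerate(vals) if i % 2 == 0]
  (PySem.List.enumerate diskmap 0).filterMap (fun iv =>
    if PySem.Int.mod iv.1 2 = 0 then
      some [("value", PySem.Int.floordiv iv.1 2), ("index", PySem.List.pyGetD pre iv.1 0), ("size", iv.2)]
    else none)

-- ===== PRECONDITION & SPEC =====
def Spec_diskmap_files (diskmap : List Int) (out : List (List (String × Int))) : Prop := out = diskmap_files_alt diskmap
instance (diskmap : List Int) (out : List (List (String × Int))) : Decidable (Spec_diskmap_files diskmap out) := by unfold Spec_diskmap_files; infer_instance

-- ===== CLAIM (what is proved, stated in full; the proofs are below) =====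
def Claim_equal_diskmap_files : Prop := ∀ (diskmap : List Int), Dom_diskmap_files diskmap → Spec_diskmap_files diskmap (diskmap_files diskmap)

-- ===== LEMMAS AND PROOFS =====

-- common normal form: the file records, consuming the list with running offset a and position n
def pvSpec2 (xs : List Int) (a : Int) (n : Nat) : List (List (String × Int)) :=
  match xs with
  | [] => []
  | v :: t =>
    if n % 2 = 0 then
      [("value", ((n / 2 : Nat) : Int)), ("index", a), ("size", v)] :: pvSpec2 t (a + v) (n + 1)
    else pvSpec2 t (a + v) (n + 1)

-- proof-side prefix-sum list (mirrors B's prefix loop without the list append)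
def pvScan (xs : List Int) (c : Int) : List Int :=
  match xs with
  | [] => []
  | v :: t => (c + v) :: pvScan t (c + v)

theorem pvFoldA_eq (xs : List Int) : ∀ (a : Int) (n : Nat) (files : List (List (String × Int))),
    (xs.foldl pvStepA (a, (((n + 1) / 2 : Nat) : Int), decide (n % 2 = 0), files)).2.2.2
      = files ++ pvSpec2 xs a n := by
  induction xs with
  | nil => intro a n files; simp [pvSpec2]
  | cons v t ih =>
    intro a n files
    by_cases h : n % 2 = 0
    · have h1 : ((n + 1) + 1) / 2 = (n + 1) / 2 + 1 := by omega
      have h2 : ¬ (n + 1) % 2 = 0 := by omega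
      have h3 : (n + 1) / 2 = n / 2 := by omega
      rw [show (decide (n % 2 = 0)) = true from by simp [h]]
      simp only [List.foldl_cons, pvStepA]
      rw [show ((((n + 1) / 2 : Nat) : Int) + 1) = (((n + 1 + 1) / 2 : Nat) : Int) by
        rw [h1]; push_cast; ring]
      rw [show (!true : Bool) = decide ((n + 1) % 2 = 0) from by simp [h2]]
      simp only [if_true]
      rw [ih (a + v) (n + 1)]
      simp [pvSpec2, h, h3]
    · have h2 : (n + 1) % 2 = 0 := by omega
      have h1 : (n + 1 + 1) / 2 = (n + 1) / 2 := by omega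
      rw [show (decide (n % 2 = 0)) = false from by simp [h]]
      simp only [List.foldl_cons, pvStepA, Bool.false_eq_true]
      rw [show (!false : Bool) = decide ((n + 1) % 2 = 0) from by simp [h2]]
      rw [show (((n + 1) / 2 : Nat) : Int) = (((n + 1 + 1) / 2 : Nat) : Int) by rw [h1]]
      simp only [if_false]
      rw [ih (a + v) (n + 1)]
      simp [pvSpec2, h]

theorem pvPrefixFold (xs : List Int) : ∀ (acc : List Int) (h : acc ≠ []),
    xs.foldl (fun p v => p ++ [PySem.List.pyGetD p (-1) 0 + v]) acc
      = acc ++ pvScan xs (acc.getLast h) := by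
  induction xs with
  | nil => intro acc h; simp [pvScan]
  | cons v t ih =>
    intro acc h
    simp only [List.foldl_cons]
    rw [PySem.List.pyGetD_neg_one (h := h)]
    rw [ih (acc ++ [acc.getLast h + v]) (by simp)]
    simp [pvScan]

theorem pvScan_getD (xs : List Int) : ∀ (c : Int) (j : Nat), j ≤ xs.length →
    PySem.List.pyGetD (c :: pvScan xs c) ((j : Nat) : Int) 0 = c + (xs.take j).sum := by
  induction xs with
  | nil =>
    intro c j hj
    simp only [List.length_nil, Nat.le_zero] at hj
    subst hj
    simp [pvScan]
  | cons v t ih =>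
    intro c j hj
    cases j with
    | zero => simp
    | succ k =>
      have := ih (c + v) k (by simpa using hj)
      simp only [pvScan, PySem.List.pyGetD_natCast] at this ⊢
      simpa [List.take_succ_cons, add_assoc] using this

theorem pvEnum_eq (xs : List Int) : ∀ (n : Nat) (a : Int) (pre : List Int),
    (∀ j : Nat, j ≤ xs.length → PySem.List.pyGetD pre (((n + j : Nat) : Nat) : Int) 0 = a + (xs.take j).sum) →
    ((PySem.List.enumerate xs (n : Int)).filterMap (fun iv =>
      if PySem.Int.mod iv.1 2 = 0 then
        some [("value", PySem.Int.floordiv iv.1 2), ("index", PySem.List.pyGetD pre iv.1 0), ("size", iv.2)]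
      else none))
      = pvSpec2 xs a n := by
  induction xs with
  | nil => intro n a pre _; simp [pvSpec2]
  | cons v t ih =>
    intro n a pre H
    rw [PySem.List.enumerate_cons]
    have hmod : PySem.Int.mod (n : Int) 2 = ((n % 2 : Nat) : Int) := by
      exact_mod_cast PySem.Int.mod_natCast n 2
    have hdiv : PySem.Int.floordiv (n : Int) 2 = ((n / 2 : Nat) : Int) := by
      exact_mod_cast PySem.Int.floordiv_natCast n 2
    have h0 : PySem.List.pyGetD pre ((n : Nat) : Int) 0 = a := by
      have := H 0 (by omega); simpa using this
    have hIH : ((PySem.List.enumerate t ((n : Int) + 1)).filterMap (fun iv =>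
        if PySem.Int.mod iv.1 2 = 0 then
          some [("value", PySem.Int.floordiv iv.1 2), ("index", PySem.List.pyGetD pre iv.1 0), ("size", iv.2)]
        else none)) = pvSpec2 t (a + v) (n + 1) := by
      rw [show ((n : Int) + 1) = ((n + 1 : Nat) : Int) by push_cast; ring]
      apply ih (n + 1) (a + v) pre
      intro j hj
      have := H (j + 1) (by simpa using Nat.succ_le_succ hj)
      rw [show (n + 1 + j) = (n + (j + 1)) by omega]
      simpa [List.take_succ_cons, add_assoc] using this
    by_cases h : n % 2 = 0
    · have hc : ((n % 2 : Nat) : Int) = 0 := by exact_mod_cast h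
      simp only [List.filterMap_cons, hmod, hdiv, if_pos hc, pvSpec2, if_pos h]
      rw [h0, hIH]
    · have hc : ¬ (((n % 2 : Nat) : Int) = 0) := by exact_mod_cast h
      simp only [List.filterMap_cons, hmod, pvSpec2, if_neg h, if_neg hc]
      exact hIH

-- ===== VERDICT (by name: the statement is the Claim_ definition above) =====
theorem diskmap_files_spec : Claim_equal_diskmap_files := by
  intro xs _
  unfold Spec_diskmap_files diskmap_files diskmap_files_alt
  have hA : (xs.foldl pvStepA (0, 0, true, [])).2.2.2 = pvSpec2 xs 0 0 := by
    have := pvFoldA_eq xs 0 0 []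
    simpa using this
  have hpre : xs.foldl (fun p v => p ++ [PySem.List.pyGetD p (-1) 0 + v]) [(0 : Int)]
      = (0 : Int) :: pvScan xs 0 := by
    have := pvPrefixFold xs [(0 : Int)] (by simp)
    simpa using this
  rw [hA]
  simp only [hpre]
  have H : ∀ j : Nat, j ≤ xs.length →
      PySem.List.pyGetD ((0 : Int) :: pvScan xs 0) (((0 + j : Nat) : Nat) : Int) 0 = 0 + (xs.take j).sum := by
    intro j hj
    have := pvScan_getD xs 0 j hj
    simpa using this
  have h2 := pvEnum_eq xs 0 0 ((0 : Int) :: pvScan xs 0) H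
  rw [Nat.cast_zero] at h2
  exact h2.symm
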